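-- pv_equiv track=rewrite | github.com/imranariffin/coding-practice | gcj-2019/round00-forgone-solution/solution.py | forgone_solution
-- ===== SOURCE A (Python) =====
-- from collections import defaultdict
--
-- def forgone_solution(n):
--     mem = defaultdict(list)
--     p = 1
--     while n > 0:
--         n, d = divmod(n, 10)
--         if d == 4:
--             mem[p].append(2)
--             mem[p].append(2)
--         else:
--             mem[p].append(d)
--         p *= 10
--
--     a = 0
--     for p in mem:
--         a += mem[p].pop() * p
--     b = 0
--     for p in mem:
--         if mem[p]:
--             b += mem[p].pop() * p
--
--     return a, b
-- ===== SOURCE B (Python) =====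
-- def forgone_solution(n):
--     a = 0
--     b = 0
--     p = 1
--     while n > 0:
--         n, d = divmod(n, 10)
--         if d == 4:
--             a += 2 * p
--             b += 2 * p
--         else:
--             a += d * p
--         p *= 10
--     return a, b
-- ===== Notes on version B (the rewrite author's own statement) =====
-- stated objective: simpler
-- what changed: B drops A's defaultdict of per-place digit lists and its two subsequent pop-loops, computing both addends in the single digit-extraction loop with two running accumulators (add 2*p to both when the digit is 4, else d*p to the first).
import Mathlib
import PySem

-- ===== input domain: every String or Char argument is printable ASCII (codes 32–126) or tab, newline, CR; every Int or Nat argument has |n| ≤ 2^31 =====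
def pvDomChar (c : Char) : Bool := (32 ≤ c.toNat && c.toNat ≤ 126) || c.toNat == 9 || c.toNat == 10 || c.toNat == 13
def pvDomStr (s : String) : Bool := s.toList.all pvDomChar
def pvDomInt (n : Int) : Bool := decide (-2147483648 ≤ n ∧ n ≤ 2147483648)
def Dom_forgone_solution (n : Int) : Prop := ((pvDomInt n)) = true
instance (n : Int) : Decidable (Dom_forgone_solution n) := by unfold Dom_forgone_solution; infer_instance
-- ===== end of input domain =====

-- B replaces A's defaultdict of per-place digit lists and the two pop-loops by a single
-- digit loop with two running accumulators (objective: simpler, one pass, no container).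

-- ===== PORT A =====
-- the while-loop building mem: defaultdict(list) keyed by the place value p
def pvLoopA (n p : Int) (mem : PySem.Dict Int (List Int)) : PySem.Dict Int (List Int) :=
  if h : 0 < n then
    let q := PySem.Int.floordiv n 10
    let d := PySem.Int.mod n 10
    let mem' := if d == 4 then (mem.modify p [] (· ++ [2])).modify p [] (· ++ [2])
                else mem.modify p [] (· ++ [d])
    pvLoopA q (p * 10) mem'
  else mem
termination_by n.toNat
decreasing_by
  have h1 : PySem.Int.floordiv n 10 < n :=
    (PySem.Int.floordiv_lt_iff_lt_mul (by norm_num)).mpr (by omega)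
  omega

def forgone_solution (n : Int) : Int × Int :=
  let mem := pvLoopA n 1 PySem.Dict.empty
  -- 'for p in mem: a += mem[p].pop() * p'  (pop of an empty list would be IndexError =
  -- the none branch, unreachable here since every stored list is nonempty)
  let sa := mem.keys.foldl (fun s p =>
    match PySem.List.pop? (s.2.getD p []) (-1) with
    | some (x, rest) => (s.1 + x * p, s.2.insert p rest)
    | none => s) ((0 : Int), mem)
  -- 'for p in mem: if mem[p]: b += mem[p].pop() * p'
  let sb := mem.keys.foldl (fun s p =>
    if (s.2.getD p []).isEmpty then s
    else match PySem.List.pop? (s.2.getD p []) (-1) with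
      | some (x, rest) => (s.1 + x * p, s.2.insert p rest)
      | none => s) ((0 : Int), sa.2)
  (sa.1, sb.1)

-- ===== PORT B =====
def pvLoopB (n a b p : Int) : Int × Int :=
  if h : 0 < n then
    let q := PySem.Int.floordiv n 10
    let d := PySem.Int.mod n 10
    if d == 4 then pvLoopB q (a + 2 * p) (b + 2 * p) (p * 10)
    else pvLoopB q (a + d * p) b (p * 10)
  else (a, b)
termination_by n.toNat
decreasing_by
  all_goals
    have h1 : PySem.Int.floordiv n 10 < n :=
      (PySem.Int.floordiv_lt_iff_lt_mul (by norm_num)).mpr (by omega)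
    omega

def forgone_solution_alt (n : Int) : Int × Int := pvLoopB n 0 0 1

-- ===== PRECONDITION & SPEC =====
def Spec_forgone_solution (n : Int) (out : Int × Int) : Prop := out = forgone_solution_alt n
instance (n : Int) (out : Int × Int) : Decidable (Spec_forgone_solution n out) := by unfold Spec_forgone_solution; infer_instance

-- ===== CLAIM (what is proved, stated in full; the proofs are below) =====
def Claim_equal_forgone_solution : Prop := ∀ (n : Int), Dom_forgone_solution n → Spec_forgone_solution n (forgone_solution n)

-- ===== LEMMAS AND PROOFS =====

-- the (digit, place) pairs A's while-loop visits
def pvDigits (n p : Int) : List (Int × Int) :=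
  if h : 0 < n then (PySem.Int.mod n 10, p) :: pvDigits (PySem.Int.floordiv n 10) (p * 10)
  else []
termination_by n.toNat
decreasing_by
  have h1 : PySem.Int.floordiv n 10 < n :=
    (PySem.Int.floordiv_lt_iff_lt_mul (by norm_num)).mpr (by omega)
  omega

-- the list A stores for a digit
def pvEntry (d : Int) : List Int := if d == 4 then [2, 2] else [d]

-- value popped from the end of l (0 if l is empty, matching a skipped key)
def pvLastv (l : List Int) : Int :=
  match PySem.List.pop? l (-1) with
  | some (x, _) => x
  | none => 0

theorem pv_pop_concat (xs : List Int) (x : Int) :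
    PySem.List.pop? (xs ++ [x]) (-1) = some (x, xs) := by
  simp [PySem.List.pop?, PySem.List.pyIdx?, List.eraseIdx_append_of_length_le]

theorem pv_pop_spec (l : List Int) (h : l ≠ []) :
    PySem.List.pop? l (-1) = some (l.getLast h, l.dropLast) := by
  conv_lhs => rw [← List.dropLast_append_getLast h]
  exact pv_pop_concat _ _

theorem pvLastv_of_ne_nil (l : List Int) (h : l ≠ []) : pvLastv l = l.getLast h := by
  unfold pvLastv
  rw [pv_pop_spec l h]

theorem pvLoopA_items (n p : Int) (mem : PySem.Dict Int (List Int))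
    (hp : 0 < p) (hlt : ∀ k ∈ mem.keys, k < p) :
    (pvLoopA n p mem).items
      = mem.items ++ (pvDigits n p).map (fun dq => (dq.2, pvEntry dq.1)) := by
  fun_induction pvLoopA n p mem with
  | case1 n p mem h q d mem' ih =>
    have hc : mem.contains p = false := by
      rw [Bool.eq_false_iff, Ne, PySem.Dict.contains_iff_mem_keys]
      intro hmem
      exact absurd (hlt p hmem) (lt_irrefl p)
    have hmap : ∀ (v : List Int),
        mem.items.map (fun q => if (q.1 == p) = true then (p, v) else q) = mem.items := by
      intro v
      conv_rhs => rw [← List.map_id mem.items]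
      apply List.map_congr_left
      intro q hq
      have hqk : q.1 ∈ mem.keys := by
        simp only [PySem.Dict.keys]
        exact List.mem_map.mpr ⟨q, hq, rfl⟩
      have : q.1 ≠ p := ne_of_lt (hlt _ hqk)
      simp [this]
    have hmem' : mem'.items = mem.items ++ [(p, pvEntry d)] := by
      show (if d == 4 then (mem.modify p [] (· ++ [2])).modify p [] (· ++ [2])
            else mem.modify p [] (· ++ [d])).items = _
      unfold pvEntry
      by_cases h4 : d = 4
      · simp only [h4, beq_self_eq_true, if_true]
        show ((mem.insert p (mem.getD p [] ++ [2])).insert p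
            ((mem.insert p (mem.getD p [] ++ [2])).getD p [] ++ [2])).items = _
        rw [PySem.Dict.getD_of_not_contains _ _ hc, PySem.Dict.getD_insert_self]
        rw [PySem.Dict.items_insert_of_contains _ _ (PySem.Dict.contains_insert_self _ _ _),
          PySem.Dict.items_insert_of_not_contains _ _ hc]
        rw [List.map_append, hmap]
        simp
      · have hb : (d == 4) = false := by simp [h4]
        simp only [hb]
        show (mem.insert p (mem.getD p [] ++ [d])).items = _
        rw [PySem.Dict.getD_of_not_contains _ _ hc,
          PySem.Dict.items_insert_of_not_contains _ _ hc]
        simp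
    have hkeys' : mem'.keys = mem.keys ++ [p] := by
      show mem'.items.map _ = _
      rw [hmem']
      simp [PySem.Dict.keys]
    rw [ih (by omega) (by
      rw [hkeys']
      intro k hk
      rcases List.mem_append.mp hk with hk | hk
      · exact lt_trans (hlt k hk) (by omega)
      · simp at hk; omega)]
    rw [hmem']
    rw [show pvDigits n p
        = (PySem.Int.mod n 10, p) :: pvDigits (PySem.Int.floordiv n 10) (p * 10) by
      rw [pvDigits]; simp [h]]
    simp only [List.map_cons, List.append_assoc, List.singleton_append]
    rfl
  | case2 n p mem h =>
    rw [pvDigits]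
    simp [h]

-- the a/b-phase loop body, as one function (the 'if mem[p]:' guard of phase b is
-- extensionally the none-branch of phase a's pop)
def pvStep (s : Int × PySem.Dict Int (List Int)) (p : Int) : Int × PySem.Dict Int (List Int) :=
  match PySem.List.pop? (s.2.getD p []) (-1) with
  | some (x, rest) => (s.1 + x * p, s.2.insert p rest)
  | none => s

theorem pvStepB_eq (s : Int × PySem.Dict Int (List Int)) (p : Int) :
    (if (s.2.getD p []).isEmpty then s
     else match PySem.List.pop? (s.2.getD p []) (-1) with
       | some (x, rest) => (s.1 + x * p, s.2.insert p rest)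
       | none => s) = pvStep s p := by
  unfold pvStep
  rcases eq_or_ne (s.2.getD p []) [] with he | he
  · rw [he]
    simp [PySem.List.pop?, PySem.List.pyIdx?]
  · simp [List.isEmpty_eq_false_iff.mpr he]

theorem pvPhase_spec (ks : List Int) (hnd : ks.Nodup) (a0 : Int) (d : PySem.Dict Int (List Int)) :
    (ks.foldl pvStep (a0, d)).1 = a0 + (ks.map (fun k => pvLastv (d.getD k []) * k)).sum
    ∧ ∀ k : Int, (ks.foldl pvStep (a0, d)).2.getD k []
        = if k ∈ ks then (d.getD k []).dropLast else d.getD k [] := by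
  induction ks generalizing a0 d with
  | nil => simp
  | cons k ks ih =>
    obtain ⟨hk, hnd'⟩ := List.nodup_cons.mp hnd
    rcases eq_or_ne (d.getD k []) [] with he | he
    · have hstep : pvStep (a0, d) k = (a0, d) := by
        unfold pvStep
        rw [he]
        simp [PySem.List.pop?, PySem.List.pyIdx?]
      obtain ⟨ih1, ih2⟩ := ih hnd' a0 d
      refine ⟨?_, ?_⟩
      · rw [List.foldl_cons, hstep, ih1, List.map_cons, List.sum_cons, he]
        show _ = a0 + (pvLastv [] * k + _)
        simp [pvLastv, PySem.List.pop?, PySem.List.pyIdx?]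
      · intro j
        rw [List.foldl_cons, hstep, ih2 j]
        by_cases hjk : j = k
        · subst hjk; simp [he]
        · simp [hjk]
    · have hstep : pvStep (a0, d) k
          = (a0 + pvLastv (d.getD k []) * k, d.insert k ((d.getD k []).dropLast)) := by
        unfold pvStep
        rw [pv_pop_spec _ he, pvLastv_of_ne_nil _ he]
      have hgd : ∀ k' ∈ ks, (d.insert k ((d.getD k []).dropLast)).getD k' [] = d.getD k' [] :=
        fun k' hk' => PySem.Dict.getD_insert_of_ne _ _ _ (fun hkk => hk (hkk ▸ hk'))
      obtain ⟨ih1, ih2⟩ := ih hnd' (a0 + pvLastv (d.getD k []) * k) (d.insert k ((d.getD k []).dropLast))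
      refine ⟨?_, ?_⟩
      · have hmc : List.map (fun j => pvLastv ((d.insert k ((d.getD k []).dropLast)).getD j []) * j) ks
            = List.map (fun j => pvLastv (d.getD j []) * j) ks :=
          List.map_congr_left (fun k' hk' => by rw [hgd k' hk'])
        rw [List.foldl_cons, hstep, ih1, hmc, List.map_cons, List.sum_cons]
        ring
      · intro j
        rw [List.foldl_cons, hstep, ih2 j]
        by_cases hj : j ∈ ks
        · simp [hj, hgd j hj]
        · by_cases hjk : j = k
          · subst hjk
            simp [hj, PySem.Dict.getD_insert_self]
          · simp [hj, hjk, PySem.Dict.getD_insert_of_ne _ _ _ hjk]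

theorem pvDigits_eq (n p : Int) :
    pvDigits n p = if 0 < n then
      (PySem.Int.mod n 10, p) :: pvDigits (PySem.Int.floordiv n 10) (p * 10) else [] := by
  rw [pvDigits, dite_eq_ite]

theorem pvDigits_places_lb (n p : Int) :
    0 < p → ∀ q ∈ (pvDigits n p).map (·.2), p ≤ q := by
  fun_induction pvDigits n p with
  | case1 n p h ih =>
    intro hp r hr
    simp only [List.map_cons, List.mem_cons] at hr
    rcases hr with rfl | hr
    · exact le_refl _
    · have := ih (by omega) r hr
      omega
  | case2 n p h =>
    intro hp r hr
    simp at hr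

theorem pvDigits_places_nodup (n p : Int) (hp : 0 < p) : ((pvDigits n p).map (·.2)).Nodup := by
  fun_induction pvDigits n p with
  | case1 n p h ih =>
    rw [List.map_cons]
    refine List.nodup_cons.mpr ⟨?_, ih (by omega)⟩
    intro hmem
    have := pvDigits_places_lb _ _ (by omega) p hmem
    omega
  | case2 n p h =>
    simp

theorem pvLastv_entry (d : Int) : pvLastv (pvEntry d) = if d == 4 then 2 else d := by
  unfold pvEntry
  by_cases h4 : d = 4
  · simp [h4]; rfl
  · have hb : (d == 4) = false := by simp [h4]
    rw [hb]
    simp only [if_false, Bool.false_eq_true]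
    rw [pvLastv_of_ne_nil _ (by simp)]
    simp

theorem pvLastv_entry_dropLast (d : Int) :
    pvLastv (pvEntry d).dropLast = if d == 4 then 2 else 0 := by
  unfold pvEntry
  by_cases h4 : d = 4
  · simp [h4]; rfl
  · have hb : (d == 4) = false := by simp [h4]
    rw [hb]
    simp only [Bool.false_eq_true, if_false]
    rfl

theorem pvLoopB_spec (n a b p : Int) :
    pvLoopB n a b p
      = (a + ((pvDigits n p).map (fun dq => pvLastv (pvEntry dq.1) * dq.2)).sum,
         b + ((pvDigits n p).map (fun dq => pvLastv (pvEntry dq.1).dropLast * dq.2)).sum) := by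
  fun_induction pvLoopB n a b p with
  | case1 n a b p h q d h4 ih =>
    rw [show pvDigits n p
        = (PySem.Int.mod n 10, p) :: pvDigits (PySem.Int.floordiv n 10) (p * 10) from by
      rw [pvDigits_eq, if_pos h]]
    rw [ih]
    have h4' : (PySem.Int.mod n 10 == 4) = true := h4
    simp only [List.map_cons, List.sum_cons, pvLastv_entry, pvLastv_entry_dropLast, h4',
      if_pos, Prod.mk.injEq]
    constructor <;> ring
  | case2 n a b p h q d h4 ih =>
    rw [show pvDigits n p
        = (PySem.Int.mod n 10, p) :: pvDigits (PySem.Int.floordiv n 10) (p * 10) from by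
      rw [pvDigits_eq, if_pos h]]
    rw [ih]
    have hb : (PySem.Int.mod n 10 == 4) = false := Bool.eq_false_iff.mpr h4
    simp only [List.map_cons, List.sum_cons, pvLastv_entry, pvLastv_entry_dropLast, hb,
      Bool.false_eq_true, if_false, Prod.mk.injEq]
    constructor <;> ring
  | case3 n a b p h =>
    rw [pvDigits_eq, if_neg h]
    simp

-- ===== VERDICT (by name: the statement is the Claim_ definition above) =====
theorem forgone_solution_spec : Claim_equal_forgone_solution := by
  intro n _
  show forgone_solution n = forgone_solution_alt n
  have hB : (fun (s : Int × PySem.Dict Int (List Int)) (p : Int) =>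
      if (s.2.getD p []).isEmpty then s
      else match PySem.List.pop? (s.2.getD p []) (-1) with
        | some (x, rest) => (s.1 + x * p, s.2.insert p rest)
        | none => s) = pvStep := funext fun s => funext fun p => pvStepB_eq s p
  simp only [forgone_solution]
  rw [hB]
  show ((((pvLoopA n 1 PySem.Dict.empty).keys.foldl pvStep (0, pvLoopA n 1 PySem.Dict.empty)).1,
       ((pvLoopA n 1 PySem.Dict.empty).keys.foldl pvStep
         (0, ((pvLoopA n 1 PySem.Dict.empty).keys.foldl pvStep (0, pvLoopA n 1 PySem.Dict.empty)).2)).1)) = _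
  set mem := pvLoopA n 1 PySem.Dict.empty with hmemdef
  have hitems : mem.items = (pvDigits n 1).map (fun dq => (dq.2, pvEntry dq.1)) := by
    rw [hmemdef, pvLoopA_items n 1 PySem.Dict.empty (by omega) (by intro k hk; simp [PySem.Dict.empty, PySem.Dict.keys] at hk)]
    simp [PySem.Dict.empty]
  have hkeys : mem.keys = (pvDigits n 1).map (·.2) := by
    show mem.items.map _ = _
    rw [hitems, List.map_map]
    rfl
  have hnd : mem.keys.Nodup := by rw [hkeys]; exact pvDigits_places_nodup n 1 (by omega)
  have hget : ∀ dq ∈ pvDigits n 1, mem.getD dq.2 [] = pvEntry dq.1 := by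
    intro dq hdq
    exact PySem.Dict.getD_of_mem_items mem
      (by rw [hitems]; exact List.mem_map.mpr ⟨dq, hdq, rfl⟩) hnd []
  obtain ⟨ha, hd1⟩ := pvPhase_spec mem.keys hnd 0 mem
  set d1 := (List.foldl pvStep (0, mem) mem.keys).2 with hd1def
  obtain ⟨hb, -⟩ := pvPhase_spec mem.keys hnd 0 d1
  have hsum1 : List.map (fun k => pvLastv (mem.getD k []) * k) mem.keys
      = List.map (fun dq => pvLastv (pvEntry dq.1) * dq.2) (pvDigits n 1) := by
    rw [hkeys, List.map_map]
    refine List.map_congr_left fun dq hdq => ?_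
    simp only [Function.comp_apply]
    rw [hget dq hdq]
  have hsum2 : List.map (fun k => pvLastv (d1.getD k []) * k) mem.keys
      = List.map (fun dq => pvLastv (pvEntry dq.1).dropLast * dq.2) (pvDigits n 1) := by
    rw [hkeys, List.map_map]
    refine List.map_congr_left fun dq hdq => ?_
    simp only [Function.comp_apply]
    rw [hd1 dq.2, if_pos (by rw [hkeys]; exact List.mem_map.mpr ⟨dq, hdq, rfl⟩), hget dq hdq]
  rw [forgone_solution_alt, pvLoopB_spec, ha, hb, hsum1, hsum2]
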